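-- pv_equiv track=rewrite | github.com/deLimaNicolas/exercises | 755/solution.py | pourWater
-- ===== SOURCE A (Python) =====
-- from typing import List
--
-- def pourWater(heights: List[int], volume: int, k: int) -> List[int]:
--     for _ in range(volume):
--         # Try flowing left first
--         best = k
--
--         # Scan left from k-1 to 0
--         for i in range(k - 1, -1, -1):
--             if heights[i] > heights[best]:
--                 break  # Hit a wall going up, stop
--             if heights[i] < heights[best]:
--                 best = i  # Found lower ground, update best
--             # If equal, keep going but remember this position
--
--         # If we stayed at k (couldn't go left), try right
--         if best == k:
--             for i in range(k + 1, len(heights)):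
--                 if heights[i] > heights[best]:
--                     break  # Hit a wall going up, stop
--                 if heights[i] < heights[best]:
--                     best = i  # Found lower ground, update best
--
--         # Drop the water at the best position
--         heights[best] += 1
--
--     return heights
-- ===== SOURCE B (Python) =====
-- def _drop_index(heights, k):
--     # walk to the start of the maximal non-decreasing run ending at k
--     s = k
--     while s > 0 and heights[s - 1] <= heights[s]:
--         s -= 1
--     if heights[s] < heights[k]:
--         # settle on the cell of that minimum closest to k
--         while s < k and heights[s + 1] == heights[s]:
--             s += 1
--         return s
--     # right: walk to the end of the maximal non-increasing run starting at k
--     e = k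
--     while e + 1 < len(heights) and heights[e + 1] <= heights[e]:
--         e += 1
--     if heights[e] < heights[k]:
--         while e > k and heights[e - 1] == heights[e]:
--             e -= 1
--         return e
--     return k
--
--
-- def pourWater(heights, volume, k):
--     # batch-fill: the landing cell stays the same while its level is below both
--     # neighbouring cells, so pour that many units in one step instead of one by one
--     n = len(heights)
--     remaining = volume
--     while remaining > 0:
--         t = _drop_index(heights, k)
--         bound = None
--         if t > 0:
--             bound = heights[t - 1]
--         if t + 1 < n:
--             bound = heights[t + 1] if bound is None else min(bound, heights[t + 1])
--         c = remaining if bound is None else max(1, min(remaining, bound - heights[t]))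
--         heights[t] += c
--         remaining -= c
--     return heights
-- ===== Notes on version B (the rewrite author's own statement) =====
-- stated objective: alternative
-- what changed: A simulates unit by unit (one full scan of the terrain per poured unit); B batch-fills: it locates the landing cell, pours min(remaining, neighbour level - cell level) units in a single step, and rescans only when the landing cell changes, so a deep cell is filled in one step rather than one scan per unit (on flat terrain every batch is 1 unit, so the worst-case cost matches A's).
-- outside the precondition, e.g. on pourWater([0, 2, 0], 3, -2): A returns [1, 2, 2], B returns [2, 2, 1]; on pourWater([0, 2, 1], 2, -1): A returns [1, 2, 2], B returns [2, 2, 1]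
import Mathlib
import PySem

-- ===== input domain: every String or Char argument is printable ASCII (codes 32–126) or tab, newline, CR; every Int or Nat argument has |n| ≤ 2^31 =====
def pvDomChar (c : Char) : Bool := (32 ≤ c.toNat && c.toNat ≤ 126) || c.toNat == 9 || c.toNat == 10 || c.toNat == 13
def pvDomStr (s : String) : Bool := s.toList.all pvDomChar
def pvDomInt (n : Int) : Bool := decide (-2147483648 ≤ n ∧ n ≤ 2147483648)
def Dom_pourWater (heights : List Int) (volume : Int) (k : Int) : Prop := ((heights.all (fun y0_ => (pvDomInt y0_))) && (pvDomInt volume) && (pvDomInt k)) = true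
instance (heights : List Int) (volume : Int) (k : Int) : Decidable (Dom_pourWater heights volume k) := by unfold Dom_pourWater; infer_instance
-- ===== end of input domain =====

-- B batch-fills: instead of A's unit-by-unit simulation (one full scan per poured
-- unit), B finds the landing cell and pours min(remaining, neighbour level − cell
-- level) units in one step (objective: alternative algorithm, same worst-case cost).
-- Both Pythons mutate `heights` in place and return it; the equivalence proved
-- here is about the return value.

-- ===== PORT A =====
def pvA_get (h : List Int) (i : Int) : Int := PySem.List.pyGetD h i 0

-- `for i in range(k-1, -1, -1)` with break: fuel f is the number of remaining
-- indices, the current index is f-1 (scan starts at k-1 with fuel k.toNat).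
def pvA_left (h : List Int) : Nat → Int → Int
  | 0, best => best
  | f + 1, best =>
      if pvA_get h f > pvA_get h best then best
      else pvA_left h f (if pvA_get h f < pvA_get h best then (f : Int) else best)

-- `for i in range(k+1, len(heights))` with break: fuel = number of remaining indices.
def pvA_right (h : List Int) : Nat → Int → Int → Int
  | 0, _, best => best
  | f + 1, i, best =>
      if pvA_get h i > pvA_get h best then best
      else pvA_right h f (i + 1) (if pvA_get h i < pvA_get h best then i else best)

def pvA_drop (h : List Int) (k : Int) : List Int :=
  let best := pvA_left h k.toNat k
  let best := if best = k then pvA_right h (PySem.List.len h - (k + 1)).toNat (k + 1) best else best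
  PySem.List.pySetD h best (pvA_get h best + 1)

def pourWater (heights : List Int) (volume : Int) (k : Int) : List Int :=
  (List.range volume.toNat).foldl (fun h _ => pvA_drop h k) heights

-- ===== PORT B =====
def pvB_get (h : List Int) (i : Int) : Int := PySem.List.pyGetD h i 0

-- `while s > 0 and heights[s-1] <= heights[s]: s -= 1` (fuel k.toNat: s starts at k
-- and decreases, so the fuel encodes the guard exactly when 0 ≤ k).
def pvB_runStart (h : List Int) : Nat → Int → Int
  | 0, s => s
  | f + 1, s => if pvB_get h (s - 1) ≤ pvB_get h s then pvB_runStart h f (s - 1) else s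

-- `while s < k and heights[s+1] == heights[s]: s += 1` (fuel (k-s).toNat = guard s < k)
def pvB_flatRight (h : List Int) : Nat → Int → Int
  | 0, s => s
  | f + 1, s => if pvB_get h (s + 1) = pvB_get h s then pvB_flatRight h f (s + 1) else s

-- `while e + 1 < len(heights) and heights[e+1] <= heights[e]: e += 1` (fuel n-1-e)
def pvB_runEnd (h : List Int) : Nat → Int → Int
  | 0, e => e
  | f + 1, e => if pvB_get h (e + 1) ≤ pvB_get h e then pvB_runEnd h f (e + 1) else e

-- `while e > k and heights[e-1] == heights[e]: e -= 1` (fuel (e-k).toNat = guard e > k)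
def pvB_flatLeft (h : List Int) : Nat → Int → Int
  | 0, e => e
  | f + 1, e => if pvB_get h (e - 1) = pvB_get h e then pvB_flatLeft h f (e - 1) else e

-- Source B's _drop_index
def pvB_dropIndex (h : List Int) (k : Int) : Int :=
  let s := pvB_runStart h k.toNat k
  if pvB_get h s < pvB_get h k then pvB_flatRight h (k - s).toNat s
  else
    let e := pvB_runEnd h (PySem.List.len h - 1 - k).toNat k
    if pvB_get h e < pvB_get h k then pvB_flatLeft h (e - k).toNat e
    else k

-- `bound = None; if t > 0: bound = heights[t-1]; if t+1 < n: bound = … min …`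
def pvB_bound (h : List Int) (t : Int) : Option Int :=
  let b : Option Int := if t > 0 then some (pvB_get h (t - 1)) else none
  if t + 1 < PySem.List.len h then
    some (match b with
          | none => pvB_get h (t + 1)
          | some x => min x (pvB_get h (t + 1)))
  else b

-- `while remaining > 0: …` — each pass pours c ≥ 1 units, so remaining.toNat decreases
def pvB_loop (k : Int) (h : List Int) (remaining : Int) : List Int :=
  if 0 < remaining then
    let t := pvB_dropIndex h k
    let c := match pvB_bound h t with
      | none => remaining
      | some b => max 1 (min remaining (b - pvB_get h t))
    pvB_loop k (PySem.List.pySetD h t (pvB_get h t + c)) (remaining - c)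
  else h
  termination_by remaining.toNat
  decreasing_by
    have hc : 1 ≤ (match pvB_bound h (pvB_dropIndex h k) with
        | none => remaining
        | some b => max 1 (min remaining (b - pvB_get h (pvB_dropIndex h k)))) := by
      rcases pvB_bound h (pvB_dropIndex h k) with _ | b
      · exact (by omega : (1:Int) ≤ remaining)
      · exact le_max_left _ _
    omega

def pourWater_alt (heights : List Int) (volume : Int) (k : Int) : List Int :=
  pvB_loop k heights volume

-- ===== PRECONDITION & SPEC =====
-- Pre_ restricts to the task's natural domain 0 ≤ k < len(heights) whenever any
-- water is poured: for k ≥ len A raises IndexError, and for negative k A's scans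
-- read and write through Python's negative-index wraparound (an accidental
-- behaviour B's batch-fill does not reproduce; examples in claim.json "cites").
def Pre_pourWater (heights : List Int) (volume : Int) (k : Int) : Prop :=
  volume ≤ 0 ∨ (0 ≤ k ∧ k < PySem.List.len heights)
instance (heights : List Int) (volume : Int) (k : Int) : Decidable (Pre_pourWater heights volume k) := by unfold Pre_pourWater; infer_instance

def pvWitness_pourWater : List Int × Int × Int := ([2, 1, 1, 3, 0], 6, 3)

def Spec_pourWater (heights : List Int) (volume : Int) (k : Int) (out : List Int) : Prop := out = pourWater_alt heights volume k
instance (heights : List Int) (volume : Int) (k : Int) (out : List Int) : Decidable (Spec_pourWater heights volume k out) := by unfold Spec_pourWater; infer_instance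

-- ===== CLAIM (what is proved, stated in full; the proofs are below) =====
def Claim_equal_pourWater : Prop := ∀ (heights : List Int) (volume : Int) (k : Int), Dom_pourWater heights volume k → Pre_pourWater heights volume k → Spec_pourWater heights volume k (pourWater heights volume k)

-- ===== LEMMAS AND PROOFS =====

theorem pvB_get_eq (h : List Int) (i : Int) : pvB_get h i = pvA_get h i := rfl

-- A's per-unit loop, abbreviated for the proofs
def iterDrop (k : Int) (m : Nat) (h : List Int) : List Int :=
  (List.range m).foldl (fun h _ => pvA_drop h k) h

theorem iterDrop_add (k : Int) (a b : Nat) (h : List Int) :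
    iterDrop k (a + b) h = iterDrop k b (iterDrop k a h) := by
  induction b with
  | zero => rfl
  | succ b ih =>
      rw [Nat.add_succ]
      simp only [iterDrop, List.range_succ, List.foldl_append, List.foldl_cons, List.foldl_nil] at ih ⊢
      rw [ih]

-- point update / read lemmas on in-range Int indices
theorem get_set (h : List Int) (t i : Int) (v : Int)
    (ht0 : 0 ≤ t) (htn : t < PySem.List.len h) (hi0 : 0 ≤ i) (hin : i < PySem.List.len h) :
    pvA_get (PySem.List.pySetD h t v) i = if i = t then v else pvA_get h i := by
  obtain ⟨tn, rfl⟩ : ∃ tn : Nat, t = (tn : Int) := ⟨t.toNat, (Int.toNat_of_nonneg ht0).symm⟩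
  obtain ⟨im, rfl⟩ : ∃ im : Nat, i = (im : Int) := ⟨i.toNat, (Int.toNat_of_nonneg hi0).symm⟩
  have htl : tn < h.length := by simp only [PySem.List.len_eq] at htn; exact_mod_cast htn
  unfold pvA_get
  rw [PySem.List.pyGetD_pySetD_natCast h tn im v 0 htl]
  by_cases hcase : im = tn <;> simp [hcase]

theorem set_set (h : List Int) (t : Int) (v w : Int) (ht0 : 0 ≤ t) :
    PySem.List.pySetD (PySem.List.pySetD h t v) t w = PySem.List.pySetD h t w := by
  rw [PySem.List.pySetD_of_nonneg _ _ ht0, PySem.List.pySetD_of_nonneg _ _ ht0,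
      PySem.List.pySetD_of_nonneg _ _ ht0, List.set_set]

theorem len_set (h : List Int) (t : Int) (v : Int) :
    PySem.List.len (PySem.List.pySetD h t v) = PySem.List.len h := by
  simp [PySem.List.len_eq, PySem.List.length_pySetD]

-- ---- walk lemmas ----

-- run-start walk: bounds, value monotonicity, flatness when the value is preserved
theorem rs_le (h : List Int) : ∀ (f : Nat) (s : Int), pvB_runStart h f s ≤ s := by
  intro f
  induction f with
  | zero => intro s; simp [pvB_runStart]
  | succ f ih =>
      intro s
      simp only [pvB_runStart]
      split
      · have := ih (s - 1); omega
      · omega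

theorem rs_ge (h : List Int) : ∀ (f : Nat) (s : Int), s - f ≤ pvB_runStart h f s := by
  intro f
  induction f with
  | zero => intro s; simp [pvB_runStart]
  | succ f ih =>
      intro s
      simp only [pvB_runStart]
      split
      · have := ih (s - 1); push_cast; push_cast at this; omega
      · push_cast; omega

theorem rs_mono (h : List Int) : ∀ (f : Nat) (s : Int), pvA_get h (pvB_runStart h f s) ≤ pvA_get h s := by
  intro f
  induction f with
  | zero => intro s; simp [pvB_runStart]
  | succ f ih =>
      intro s
      simp only [pvB_runStart]
      split
      · rename_i hle
        have := ih (s - 1)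
        rw [pvB_get_eq, pvB_get_eq] at hle
        omega
      · omega

theorem rs_flat (h : List Int) : ∀ (f : Nat) (s : Int),
    pvA_get h (pvB_runStart h f s) = pvA_get h s →
    ∀ i : Int, pvB_runStart h f s ≤ i → i ≤ s → pvA_get h i = pvA_get h s := by
  intro f
  induction f with
  | zero =>
      intro s _ i h1 h2
      simp only [pvB_runStart] at h1
      have : i = s := le_antisymm h2 h1
      rw [this]
  | succ f ih =>
      intro s hval i h1 h2
      simp only [pvB_runStart] at hval h1 ⊢
      by_cases hc : pvB_get h (s - 1) ≤ pvB_get h s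
      · simp only [if_pos hc] at hval h1
        rw [pvB_get_eq, pvB_get_eq] at hc
        have hm := rs_mono h f (s - 1)
        have hval' : pvA_get h (pvB_runStart h f (s - 1)) = pvA_get h (s - 1) := by omega
        have hs1 : pvA_get h (s - 1) = pvA_get h s := by omega
        rcases lt_or_ge i s with hi | hi
        · have := ih (s - 1) hval' i h1 (by omega)
          omega
        · have : i = s := le_antisymm h2 hi
          rw [this]
      · simp only [if_neg hc] at h1
        have : i = s := le_antisymm h2 h1
        rw [this]

-- chain of guards along the run-start walk
theorem rs_chain (h : List Int) : ∀ (f : Nat) (s : Int),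
    ∀ i : Int, pvB_runStart h f s < i → i ≤ s → pvA_get h (i - 1) ≤ pvA_get h i := by
  intro f
  induction f with
  | zero =>
      intro s i h1 h2
      simp only [pvB_runStart] at h1
      omega
  | succ f ih =>
      intro s i h1 h2
      simp only [pvB_runStart] at h1
      by_cases hc : pvB_get h (s - 1) ≤ pvB_get h s
      · simp only [if_pos hc] at h1
        rcases lt_or_ge i s with hi | hi
        · exact ih (s - 1) i h1 (by omega)
        · have : i = s := le_antisymm h2 hi
          subst this
          rw [pvB_get_eq, pvB_get_eq] at hc
          exact hc
      · simp only [if_neg hc] at h1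
        omega

-- exact stop position of the run-start walk
theorem rs_exact (h : List Int) : ∀ (f : Nat) (s t : Int), t ≤ s → s - t ≤ f →
    (∀ i : Int, t < i → i ≤ s → pvA_get h (i - 1) ≤ pvA_get h i) →
    (s - t = f ∨ ¬ pvA_get h (t - 1) ≤ pvA_get h t) →
    pvB_runStart h f s = t := by
  intro f
  induction f with
  | zero =>
      intro s t h1 h2 _ _
      simp only [pvB_runStart]
      omega
  | succ f ih =>
      intro s t h1 h2 hchain hdisj
      simp only [pvB_runStart]
      rcases eq_or_lt_of_le h1 with heq | hlt
      · subst heq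
        have hng : ¬ pvB_get h (t - 1) ≤ pvB_get h t := by
          rw [pvB_get_eq, pvB_get_eq]
          rcases hdisj with hd | hd
          · exfalso; omega
          · exact hd
        rw [if_neg hng]
      · have hg : pvB_get h (s - 1) ≤ pvB_get h s := by
          rw [pvB_get_eq, pvB_get_eq]
          exact hchain s (by omega) le_rfl
        rw [if_pos hg]
        apply ih (s - 1) t (by omega) (by omega)
        · intro i hi1 hi2
          exact hchain i hi1 (by omega)
        · rcases hdisj with hd | hd
          · left; omega
          · right; exact hd

-- walks read only the positions they visit
theorem rs_congr (h h' : List Int) : ∀ (f : Nat) (s : Int),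
    (∀ i : Int, s - f ≤ i → i ≤ s → pvA_get h' i = pvA_get h i) →
    pvB_runStart h' f s = pvB_runStart h f s := by
  intro f
  induction f with
  | zero => intro s _; rfl
  | succ f ih =>
      intro s hg
      have e1 : pvA_get h' (s - 1) = pvA_get h (s - 1) := by
        apply hg (s - 1) _ (by omega); push_cast; omega
      have e2 : pvA_get h' s = pvA_get h s := hg s (by push_cast; omega) le_rfl
      simp only [pvB_runStart, pvB_get_eq, e1, e2]
      by_cases hc : pvA_get h (s - 1) ≤ pvA_get h s
      · rw [if_pos hc, if_pos hc]
        exact ih (s - 1) (fun i hi1 hi2 => hg i (by push_cast at hi1 ⊢; omega) (by omega))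
      · rw [if_neg hc, if_neg hc]

-- flat-right walk: value preservation, fuel extension, exact stop
theorem fr_val (h : List Int) : ∀ (f : Nat) (s : Int), pvA_get h (pvB_flatRight h f s) = pvA_get h s := by
  intro f
  induction f with
  | zero => intro s; simp [pvB_flatRight]
  | succ f ih =>
      intro s
      simp only [pvB_flatRight]
      split
      · rename_i hc
        rw [ih (s + 1)]
        rw [pvB_get_eq, pvB_get_eq] at hc
        exact hc
      · rfl

theorem fr_ge (h : List Int) : ∀ (f : Nat) (s : Int), s ≤ pvB_flatRight h f s := by
  intro f
  induction f with
  | zero => intro s; simp [pvB_flatRight]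
  | succ f ih =>
      intro s
      simp only [pvB_flatRight]
      split
      · have := ih (s + 1); omega
      · omega

theorem fr_le (h : List Int) : ∀ (f : Nat) (s : Int), pvB_flatRight h f s ≤ s + f := by
  intro f
  induction f with
  | zero => intro s; simp [pvB_flatRight]
  | succ f ih =>
      intro s
      simp only [pvB_flatRight]
      split
      · have := ih (s + 1); push_cast at this ⊢; omega
      · push_cast; omega

theorem fr_ext (h : List Int) : ∀ (f f' : Nat) (s : Int), f ≤ f' →
    (∃ m : Nat, m < f ∧ pvA_get h (s + m + 1) ≠ pvA_get h (s + m)) →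
    pvB_flatRight h f s = pvB_flatRight h f' s := by
  intro f
  induction f with
  | zero => intro f' s _ ⟨m, hm, _⟩; omega
  | succ f ih =>
      intro f' s hle ⟨m, hm, hd⟩
      obtain ⟨f'', rfl⟩ : ∃ f'', f' = f'' + 1 := ⟨f' - 1, by omega⟩
      simp only [pvB_flatRight]
      by_cases hc : pvB_get h (s + 1) = pvB_get h s
      · simp only [if_pos hc]
        apply ih f'' (s + 1) (by omega)
        have hm0 : m ≠ 0 := by
          intro hz; rw [hz] at hd; push_cast at hd
          rw [pvB_get_eq, pvB_get_eq] at hc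
          simp at hd; omega
        refine ⟨m - 1, by omega, ?_⟩
        have h1 : (s + 1) + ((m - 1 : Nat) : Int) + 1 = s + m + 1 := by omega
        have h2 : (s + 1) + ((m - 1 : Nat) : Int) = s + m := by omega
        rw [h1, h2]; exact hd
      · simp only [if_neg hc]

theorem fr_stop (h : List Int) : ∀ (f : Nat) (s t : Int), s ≤ t → t - s < f →
    (∀ i : Int, s ≤ i → i ≤ t → pvA_get h i = pvA_get h s) →
    pvA_get h (t + 1) ≠ pvA_get h t →
    pvB_flatRight h f s = t := by
  intro f
  induction f with
  | zero => intro s t h1 h2 _ _; omega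
  | succ f ih =>
      intro s t h1 h2 hflat hstop
      simp only [pvB_flatRight]
      rcases eq_or_lt_of_le h1 with heq | hlt
      · subst heq
        have : ¬ pvB_get h (s + 1) = pvB_get h s := by
          rw [pvB_get_eq, pvB_get_eq]
          intro hcontra
          exact hstop (by rw [hcontra, hflat s le_rfl le_rfl])
        simp only [if_neg this]
      · have hc : pvB_get h (s + 1) = pvB_get h s := by
          rw [pvB_get_eq, pvB_get_eq]
          exact hflat (s + 1) (by omega) (by omega)
        simp only [if_pos hc]
        apply ih (s + 1) t (by omega) (by omega)
        · intro i hi1 hi2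
          rw [pvB_get_eq, pvB_get_eq] at hc
          rw [hflat i (by omega) hi2, ← hc]
        · exact hstop

theorem exists_adj_up (h : List Int) : ∀ (d : Nat) (s t : Int), t ≤ s + d → s ≤ t →
    pvA_get h s ≠ pvA_get h t →
    ∃ m : Nat, s + m + 1 ≤ t ∧ pvA_get h (s + m + 1) ≠ pvA_get h (s + m) := by
  intro d
  induction d with
  | zero =>
      intro s t h1 h2 hne
      have : s = t := by omega
      exact absurd (by rw [this]) hne
  | succ d ih =>
      intro s t h1 h2 hne
      rcases eq_or_lt_of_le h2 with heq | hlt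
      · exact absurd (by rw [heq]) hne
      · by_cases hd : pvA_get h (s + 1) = pvA_get h s
        · obtain ⟨m, hm1, hm2⟩ := ih (s + 1) t (by omega) (by omega) (by rw [hd]; exact hne)
          refine ⟨m + 1, by push_cast at hm1 ⊢; omega, ?_⟩
          have e1 : s + ((m + 1 : Nat) : Int) + 1 = (s + 1) + m + 1 := by push_cast; ring
          have e2 : s + ((m + 1 : Nat) : Int) = (s + 1) + m := by push_cast; ring
          rw [e1, e2]; exact hm2
        · exact ⟨0, by push_cast; omega, by push_cast; simpa using hd⟩

-- main left lemma: A's leftward best-tracking scan = B's run walk + flat walk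
theorem mainLeft (h : List Int) : ∀ (f : Nat) (p : Int), pvA_get h p = pvA_get h f →
    pvA_left h f p =
      (if pvA_get h (pvB_runStart h f f) < pvA_get h f
       then pvB_flatRight h ((f : Int) - pvB_runStart h f f).toNat (pvB_runStart h f f)
       else p) := by
  intro f
  induction f with
  | zero =>
      intro p _
      simp [pvA_left, pvB_runStart]
  | succ f ih =>
      intro p hp
      have hcast : ((f + 1 : Nat) : Int) = (f : Int) + 1 := by push_cast; ring
      rw [hcast] at hp
      have hrs_unfold : pvB_runStart h (f + 1) ((f + 1 : Nat) : Int)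
          = if pvB_get h ((f : Int)) ≤ pvB_get h ((f : Int) + 1)
            then pvB_runStart h f f else (f : Int) + 1 := by
        simp only [pvB_runStart, hcast]
        norm_num
      rw [hcast] at hrs_unfold
      simp only [pvA_left, hcast]
      by_cases h1 : pvA_get h f > pvA_get h p
      · -- wall: break immediately
        simp only [if_pos h1]
        have hguard : ¬ pvB_get h ((f : Int)) ≤ pvB_get h ((f : Int) + 1) := by
          rw [pvB_get_eq, pvB_get_eq]; omega
        rw [hrs_unfold, if_neg hguard]
        simp
      · simp only [if_neg h1]
        have hguard : pvB_get h ((f : Int)) ≤ pvB_get h ((f : Int) + 1) := by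
          rw [pvB_get_eq, pvB_get_eq]; omega
        rw [hrs_unfold, if_pos hguard]
        set r := pvB_runStart h f f with hr
        have hrle : r ≤ (f : Int) := rs_le h f f
        have hrmono : pvA_get h r ≤ pvA_get h f := rs_mono h f f
        by_cases h2 : pvA_get h f < pvA_get h p
        · -- strictly lower: best becomes f
          simp only [if_pos h2]
          have hlt : pvA_get h f < pvA_get h ((f : Int) + 1) := by omega
          rw [ih (f : Int) rfl]
          have hcond2 : pvA_get h r < pvA_get h ((f : Int) + 1) := by omega
          rw [if_pos hcond2]
          by_cases h3 : pvA_get h r < pvA_get h f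
          · rw [if_pos h3]
            obtain ⟨m, hm1, hm2⟩ := exists_adj_up h ((f : Int) - r).toNat r f (by omega) hrle (by omega)
            exact fr_ext h ((f : Int) - r).toNat ((f : Int) + 1 - r).toNat r (by omega)
              ⟨m, by omega, hm2⟩
          · rw [if_neg h3]
            have hflatv : pvA_get h r = pvA_get h f := by omega
            exact (fr_stop h ((f : Int) + 1 - r).toNat r f hrle (by omega)
              (fun i hi1 hi2 => by
                have := rs_flat h f f hflatv i hi1 hi2
                omega)
              (by omega)).symm ▸ rfl
        · -- equal: best kept
          simp only [if_neg h2]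
          have heqv : pvA_get h p = pvA_get h f := by omega
          rw [ih p heqv]
          have hcond : pvA_get h r < pvA_get h f ↔ pvA_get h r < pvA_get h ((f : Int) + 1) := by
            constructor <;> intro <;> omega
          by_cases h3 : pvA_get h r < pvA_get h f
          · rw [if_pos h3, if_pos (hcond.mp h3)]
            obtain ⟨m, hm1, hm2⟩ := exists_adj_up h ((f : Int) - r).toNat r f (by omega) hrle (by omega)
            exact fr_ext h ((f : Int) - r).toNat ((f : Int) + 1 - r).toNat r (by omega)
              ⟨m, by omega, hm2⟩
          · rw [if_neg h3, if_neg (fun hc => h3 (by omega))]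

-- run-end walk (rightward mirrors)
theorem re_ge (h : List Int) : ∀ (f : Nat) (e : Int), e ≤ pvB_runEnd h f e := by
  intro f
  induction f with
  | zero => intro e; simp [pvB_runEnd]
  | succ f ih =>
      intro e
      simp only [pvB_runEnd]
      split
      · have := ih (e + 1); omega
      · omega

theorem re_le (h : List Int) : ∀ (f : Nat) (e : Int), pvB_runEnd h f e ≤ e + f := by
  intro f
  induction f with
  | zero => intro e; simp [pvB_runEnd]
  | succ f ih =>
      intro e
      simp only [pvB_runEnd]
      split
      · have := ih (e + 1); push_cast at this ⊢; omega
      · push_cast; omega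

theorem re_mono (h : List Int) : ∀ (f : Nat) (e : Int), pvA_get h (pvB_runEnd h f e) ≤ pvA_get h e := by
  intro f
  induction f with
  | zero => intro e; simp [pvB_runEnd]
  | succ f ih =>
      intro e
      simp only [pvB_runEnd]
      split
      · rename_i hle
        have := ih (e + 1)
        rw [pvB_get_eq, pvB_get_eq] at hle
        omega
      · omega

theorem re_flat (h : List Int) : ∀ (f : Nat) (e : Int),
    pvA_get h (pvB_runEnd h f e) = pvA_get h e →
    ∀ i : Int, e ≤ i → i ≤ pvB_runEnd h f e → pvA_get h i = pvA_get h e := by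
  intro f
  induction f with
  | zero =>
      intro e _ i h1 h2
      simp only [pvB_runEnd] at h2
      have : i = e := le_antisymm h2 h1
      rw [this]
  | succ f ih =>
      intro e hval i h1 h2
      simp only [pvB_runEnd] at hval h2 ⊢
      by_cases hc : pvB_get h (e + 1) ≤ pvB_get h e
      · simp only [if_pos hc] at hval h2
        rw [pvB_get_eq, pvB_get_eq] at hc
        have hm := re_mono h f (e + 1)
        have hval' : pvA_get h (pvB_runEnd h f (e + 1)) = pvA_get h (e + 1) := by omega
        have he1 : pvA_get h (e + 1) = pvA_get h e := by omega
        rcases lt_or_ge e i with hi | hi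
        · have := ih (e + 1) hval' i (by omega) h2
          omega
        · have : i = e := le_antisymm hi h1
          rw [this]
      · simp only [if_neg hc] at h2
        have : i = e := le_antisymm h2 h1
        rw [this]

theorem re_chain (h : List Int) : ∀ (f : Nat) (e : Int),
    ∀ i : Int, e ≤ i → i < pvB_runEnd h f e → pvA_get h (i + 1) ≤ pvA_get h i := by
  intro f
  induction f with
  | zero =>
      intro e i h1 h2
      simp only [pvB_runEnd] at h2
      omega
  | succ f ih =>
      intro e i h1 h2
      simp only [pvB_runEnd] at h2
      by_cases hc : pvB_get h (e + 1) ≤ pvB_get h e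
      · simp only [if_pos hc] at h2
        rcases lt_or_ge e i with hi | hi
        · exact ih (e + 1) i (by omega) h2
        · have : i = e := le_antisymm hi h1
          subst this
          rw [pvB_get_eq, pvB_get_eq] at hc
          exact hc
      · simp only [if_neg hc] at h2
        omega

theorem re_exact (h : List Int) : ∀ (f : Nat) (e t : Int), e ≤ t → t - e ≤ f →
    (∀ i : Int, e ≤ i → i < t → pvA_get h (i + 1) ≤ pvA_get h i) →
    (t - e = f ∨ ¬ pvA_get h (t + 1) ≤ pvA_get h t) →
    pvB_runEnd h f e = t := by
  intro f
  induction f with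
  | zero =>
      intro e t h1 h2 _ _
      simp only [pvB_runEnd]
      omega
  | succ f ih =>
      intro e t h1 h2 hchain hdisj
      simp only [pvB_runEnd]
      rcases eq_or_lt_of_le h1 with heq | hlt
      · rw [heq]
        have hng : ¬ pvB_get h (t + 1) ≤ pvB_get h t := by
          rw [pvB_get_eq, pvB_get_eq]
          rcases hdisj with hd | hd
          · exfalso; omega
          · exact hd
        rw [if_neg hng]
      · have hg : pvB_get h (e + 1) ≤ pvB_get h e := by
          rw [pvB_get_eq, pvB_get_eq]
          exact hchain e le_rfl (by omega)
        rw [if_pos hg]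
        apply ih (e + 1) t (by omega) (by omega)
        · intro i hi1 hi2
          exact hchain i (by omega) hi2
        · rcases hdisj with hd | hd
          · left; omega
          · right; exact hd

theorem fl_val (h : List Int) : ∀ (f : Nat) (e : Int), pvA_get h (pvB_flatLeft h f e) = pvA_get h e := by
  intro f
  induction f with
  | zero => intro e; simp [pvB_flatLeft]
  | succ f ih =>
      intro e
      simp only [pvB_flatLeft]
      split
      · rename_i hc
        rw [ih (e - 1)]
        rw [pvB_get_eq, pvB_get_eq] at hc
        exact hc
      · rfl

theorem fl_le (h : List Int) : ∀ (f : Nat) (e : Int), pvB_flatLeft h f e ≤ e := by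
  intro f
  induction f with
  | zero => intro e; simp [pvB_flatLeft]
  | succ f ih =>
      intro e
      simp only [pvB_flatLeft]
      split
      · have := ih (e - 1); omega
      · omega

theorem fl_ge (h : List Int) : ∀ (f : Nat) (e : Int), e - f ≤ pvB_flatLeft h f e := by
  intro f
  induction f with
  | zero => intro e; simp [pvB_flatLeft]
  | succ f ih =>
      intro e
      simp only [pvB_flatLeft]
      split
      · have := ih (e - 1); push_cast at this ⊢; omega
      · push_cast; omega

theorem fl_ext (h : List Int) : ∀ (f f' : Nat) (s : Int), f ≤ f' →
    (∃ m : Nat, m < f ∧ pvA_get h (s - m - 1) ≠ pvA_get h (s - m)) →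
    pvB_flatLeft h f s = pvB_flatLeft h f' s := by
  intro f
  induction f with
  | zero => intro f' s _ ⟨m, hm, _⟩; omega
  | succ f ih =>
      intro f' s hle ⟨m, hm, hd⟩
      obtain ⟨f'', rfl⟩ : ∃ f'', f' = f'' + 1 := ⟨f' - 1, by omega⟩
      simp only [pvB_flatLeft]
      by_cases hc : pvB_get h (s - 1) = pvB_get h s
      · simp only [if_pos hc]
        apply ih f'' (s - 1) (by omega)
        have hm0 : m ≠ 0 := by
          intro hz; rw [hz] at hd; push_cast at hd
          rw [pvB_get_eq, pvB_get_eq] at hc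
          simp at hd; omega
        refine ⟨m - 1, by omega, ?_⟩
        have h1 : (s - 1) - ((m - 1 : Nat) : Int) - 1 = s - m - 1 := by omega
        have h2 : (s - 1) - ((m - 1 : Nat) : Int) = s - m := by omega
        rw [h1, h2]; exact hd
      · simp only [if_neg hc]

theorem fl_stop (h : List Int) : ∀ (f : Nat) (s t : Int), t ≤ s → s - t < f →
    (∀ i : Int, t ≤ i → i ≤ s → pvA_get h i = pvA_get h s) →
    pvA_get h (t - 1) ≠ pvA_get h t →
    pvB_flatLeft h f s = t := by
  intro f
  induction f with
  | zero => intro s t h1 h2 _ _; omega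
  | succ f ih =>
      intro s t h1 h2 hflat hstop
      simp only [pvB_flatLeft]
      rcases eq_or_lt_of_le h1 with heq | hlt
      · subst heq
        have : ¬ pvB_get h (t - 1) = pvB_get h t := by
          rw [pvB_get_eq, pvB_get_eq]
          intro hcontra
          exact hstop (by rw [hcontra])
        simp only [if_neg this]
      · have hc : pvB_get h (s - 1) = pvB_get h s := by
          rw [pvB_get_eq, pvB_get_eq]
          exact hflat (s - 1) (by omega) (by omega)
        simp only [if_pos hc]
        apply ih (s - 1) t (by omega) (by omega)
        · intro i hi1 hi2
          rw [pvB_get_eq, pvB_get_eq] at hc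
          rw [hflat i hi1 (by omega), ← hc]
        · exact hstop

theorem exists_adj_down (h : List Int) : ∀ (d : Nat) (s t : Int), t ≤ s + d → s ≤ t →
    pvA_get h s ≠ pvA_get h t →
    ∃ m : Nat, s ≤ t - m - 1 ∧ pvA_get h (t - m - 1) ≠ pvA_get h (t - m) := by
  intro d
  induction d with
  | zero =>
      intro s t h1 h2 hne
      have : s = t := by omega
      exact absurd (by rw [this]) hne
  | succ d ih =>
      intro s t h1 h2 hne
      rcases eq_or_lt_of_le h2 with heq | hlt
      · exact absurd (by rw [heq]) hne
      · by_cases hd : pvA_get h (t - 1) = pvA_get h t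
        · obtain ⟨m, hm1, hm2⟩ := ih s (t - 1) (by omega) (by omega) (by rw [hd]; exact hne)
          refine ⟨m + 1, by push_cast at hm1 ⊢; omega, ?_⟩
          have e1 : t - ((m + 1 : Nat) : Int) - 1 = (t - 1) - m - 1 := by push_cast; ring
          have e2 : t - ((m + 1 : Nat) : Int) = (t - 1) - m := by push_cast; ring
          rw [e1, e2]; exact hm2
        · exact ⟨0, by push_cast; omega, by push_cast; simpa using hd⟩

-- main right lemma: A's rightward scan starting at e+1 = B's run-end + flat-left walks
theorem mainRight (h : List Int) : ∀ (f : Nat) (e p : Int), pvA_get h p = pvA_get h e →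
    pvA_right h f (e + 1) p =
      (if pvA_get h (pvB_runEnd h f e) < pvA_get h e
       then pvB_flatLeft h (pvB_runEnd h f e - e).toNat (pvB_runEnd h f e)
       else p) := by
  intro f
  induction f with
  | zero =>
      intro e p _
      simp [pvA_right, pvB_runEnd]
  | succ f ih =>
      intro e p hp
      have hre_unfold : pvB_runEnd h (f + 1) e
          = if pvB_get h (e + 1) ≤ pvB_get h e then pvB_runEnd h f (e + 1) else e := by
        simp only [pvB_runEnd]
      simp only [pvA_right]
      by_cases h1 : pvA_get h (e + 1) > pvA_get h p
      · simp only [if_pos h1]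
        have hguard : ¬ pvB_get h (e + 1) ≤ pvB_get h e := by
          rw [pvB_get_eq, pvB_get_eq]; omega
        rw [hre_unfold, if_neg hguard]
        simp
      · simp only [if_neg h1]
        have hguard : pvB_get h (e + 1) ≤ pvB_get h e := by
          rw [pvB_get_eq, pvB_get_eq]; omega
        rw [hre_unfold, if_pos hguard]
        set r := pvB_runEnd h f (e + 1) with hr
        have hrge : e + 1 ≤ r := re_ge h f (e + 1)
        have hrmono : pvA_get h r ≤ pvA_get h (e + 1) := re_mono h f (e + 1)
        rw [pvB_get_eq, pvB_get_eq] at hguard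
        by_cases h2 : pvA_get h (e + 1) < pvA_get h p
        · -- strictly lower: best becomes e+1
          simp only [if_pos h2]
          have heq : (e + 1) + 1 = e + 2 := by ring
          rw [show e + 1 + 1 = (e + 1) + 1 from rfl] at *
          rw [ih (e + 1) (e + 1) rfl]
          have hcond2 : pvA_get h r < pvA_get h e := by omega
          rw [if_pos hcond2]
          by_cases h3 : pvA_get h r < pvA_get h (e + 1)
          · rw [if_pos h3]
            obtain ⟨m, hm1, hm2⟩ := exists_adj_down h (r - (e + 1)).toNat (e + 1) r (by omega) hrge (by omega)
            exact fl_ext h (r - (e + 1)).toNat (r - e).toNat r (by omega)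
              ⟨m, by omega, hm2⟩
          · rw [if_neg h3]
            have hflatv : pvA_get h r = pvA_get h (e + 1) := by omega
            exact (fl_stop h (r - e).toNat r (e + 1) hrge (by omega)
              (fun i hi1 hi2 => by
                have := re_flat h f (e + 1) hflatv i hi1 hi2
                omega)
              (by have he : e + 1 - 1 = e := by ring
                  rw [he]; omega)).symm ▸ rfl
        · -- equal: best kept
          simp only [if_neg h2]
          have heqv : pvA_get h p = pvA_get h (e + 1) := by omega
          rw [ih (e + 1) p heqv]
          by_cases h3 : pvA_get h r < pvA_get h (e + 1)
          · rw [if_pos h3, if_pos (show pvA_get h r < pvA_get h e by omega)]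
            obtain ⟨m, hm1, hm2⟩ := exists_adj_down h (r - (e + 1)).toNat (e + 1) r (by omega) hrge (by omega)
            exact fl_ext h (r - (e + 1)).toNat (r - e).toNat r (by omega)
              ⟨m, by omega, hm2⟩
          · rw [if_neg h3, if_neg (show ¬ pvA_get h r < pvA_get h e by omega)]

-- one pour unit of A lands exactly where B's drop-index walks point, for every list and k
theorem drop_eq (h : List Int) (k : Int) :
    pvA_drop h k = PySem.List.pySetD h (pvB_dropIndex h k) (pvB_get h (pvB_dropIndex h k) + 1) := by
  by_cases hk : 0 ≤ k
  · have hkc : ((k.toNat : Nat) : Int) = k := Int.toNat_of_nonneg hk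
    have hml := mainLeft h k.toNat k (by rw [hkc])
    rw [hkc] at hml
    unfold pvA_drop pvB_dropIndex
    simp only [pvB_get_eq]
    rw [hml]
    by_cases hcond : pvA_get h (pvB_runStart h k.toNat k) < pvA_get h k
    · rw [if_pos hcond, if_pos hcond]
      have hne : pvB_flatRight h (k - pvB_runStart h k.toNat k).toNat (pvB_runStart h k.toNat k) ≠ k := by
        intro hcontra
        have := fr_val h (k - pvB_runStart h k.toNat k).toNat (pvB_runStart h k.toNat k)
        rw [hcontra] at this
        omega
      rw [if_neg hne]
    · rw [if_neg hcond, if_neg hcond, if_pos rfl]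
      have hfuel : (PySem.List.len h - (k + 1)).toNat = (PySem.List.len h - 1 - k).toNat := by
        congr 1; ring
      rw [hfuel]
      rw [mainRight h (PySem.List.len h - 1 - k).toNat k k rfl]
      rfl
  · -- k < 0 : A's left scan is empty, B's left walk has zero fuel
    have hkz : k.toNat = 0 := by omega
    unfold pvA_drop pvB_dropIndex
    simp only [pvB_get_eq, hkz]
    simp only [pvA_left, pvB_runStart]
    rw [if_neg (lt_irrefl (pvA_get h k)), if_pos trivial]
    have hfuel : (PySem.List.len h - (k + 1)).toNat = (PySem.List.len h - 1 - k).toNat := by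
      congr 1; ring
    rw [hfuel]
    rw [mainRight h (PySem.List.len h - 1 - k).toNat k k rfl]
    rfl

-- ---- batching lemmas ----

-- a flat walk with a failing first guard stays put
theorem fr_now (h : List Int) (f : Nat) (s : Int) (hne : pvA_get h (s + 1) ≠ pvA_get h s) :
    pvB_flatRight h f s = s := by
  cases f with
  | zero => rfl
  | succ f =>
      simp only [pvB_flatRight]
      rw [if_neg (by rw [pvB_get_eq, pvB_get_eq]; exact hne)]

theorem fl_now (h : List Int) (f : Nat) (e : Int) (hne : pvA_get h (e - 1) ≠ pvA_get h e) :
    pvB_flatLeft h f e = e := by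
  cases f with
  | zero => rfl
  | succ f =>
      simp only [pvB_flatLeft]
      rw [if_neg (by rw [pvB_get_eq, pvB_get_eq]; exact hne)]

-- adjacent inequalities compose along a segment
theorem chain_asc (g : Int → Int) : ∀ (d : Nat) (a : Int),
    (∀ i : Int, a < i → i ≤ a + d → g (i - 1) ≤ g i) → g a ≤ g (a + d) := by
  intro d
  induction d with
  | zero => intro a _; simp
  | succ d ih =>
      intro a hc
      have h1 : g a ≤ g (a + d) := ih a (fun i hi1 hi2 => hc i hi1 (by push_cast at hi2 ⊢; omega))
      have h2 : g (a + d) ≤ g (a + d + 1) := by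
        have := hc (a + d + 1) (by omega) (by omega)
        simpa using this
      have : a + ((d + 1 : Nat) : Int) = a + d + 1 := by push_cast; ring
      rw [this]
      omega

theorem chain_desc (g : Int → Int) : ∀ (d : Nat) (a : Int),
    (∀ i : Int, a ≤ i → i < a + d → g (i + 1) ≤ g i) → g (a + d) ≤ g a := by
  intro d
  induction d with
  | zero => intro a _; simp
  | succ d ih =>
      intro a hc
      have h1 : g (a + d) ≤ g a := ih a (fun i hi1 hi2 => hc i hi1 (by push_cast at hi2 ⊢; omega))
      have h2 : g (a + d + 1) ≤ g (a + d) := hc (a + d) (by omega) (by omega)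
      have : a + ((d + 1 : Nat) : Int) = a + d + 1 := by push_cast; ring
      rw [this]
      omega

-- decomposing B's bound
theorem bound_none (h : List Int) (t : Int) (hb : pvB_bound h t = none) :
    t ≤ 0 ∧ PySem.List.len h ≤ t + 1 := by
  unfold pvB_bound at hb
  simp only [PySem.List.len_eq] at hb ⊢
  by_cases h1 : t + 1 < (h.length : Int)
  · simp [h1] at hb
  · by_cases h2 : t > 0
    · simp [h1, h2] at hb
    · omega

theorem bound_some_lo (h : List Int) (t b : Int) (hb : pvB_bound h t = some b) (ht : 0 < t) :
    b ≤ pvA_get h (t - 1) := by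
  unfold pvB_bound at hb
  simp only [PySem.List.len_eq] at hb
  by_cases h1 : t + 1 < (h.length : Int)
  · simp only [if_pos ht, if_pos h1, Option.some.injEq] at hb
    rw [pvB_get_eq, pvB_get_eq] at hb
    omega
  · simp only [if_pos ht, if_neg h1, Option.some.injEq] at hb
    rw [pvB_get_eq] at hb
    omega

theorem bound_some_hi (h : List Int) (t b : Int) (hb : pvB_bound h t = some b)
    (ht : t + 1 < PySem.List.len h) :
    b ≤ pvA_get h (t + 1) := by
  unfold pvB_bound at hb
  simp only [PySem.List.len_eq] at hb ht
  by_cases h2 : t > 0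
  · simp only [if_pos h2, if_pos ht, Option.some.injEq] at hb
    rw [pvB_get_eq, pvB_get_eq] at hb
    omega
  · simp only [if_neg h2, if_pos ht, Option.some.injEq] at hb
    rw [pvB_get_eq] at hb
    omega

-- the landing cell is always inside the array
theorem dropIndex_range (h : List Int) (k : Int) (hk0 : 0 ≤ k) (hkn : k < PySem.List.len h) :
    0 ≤ pvB_dropIndex h k ∧ pvB_dropIndex h k < PySem.List.len h := by
  unfold pvB_dropIndex
  have hs_le : pvB_runStart h k.toNat k ≤ k := rs_le h k.toNat k
  have hs_ge : (0:Int) ≤ pvB_runStart h k.toNat k := by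
    have := rs_ge h k.toNat k; omega
  by_cases h1 : pvB_get h (pvB_runStart h k.toNat k) < pvB_get h k
  · rw [if_pos h1]
    have hge := fr_ge h (k - pvB_runStart h k.toNat k).toNat (pvB_runStart h k.toNat k)
    have hle := fr_le h (k - pvB_runStart h k.toNat k).toNat (pvB_runStart h k.toNat k)
    omega
  · rw [if_neg h1]
    have he_ge := re_ge h (PySem.List.len h - 1 - k).toNat k
    have he_le := re_le h (PySem.List.len h - 1 - k).toNat k
    by_cases h2 : pvB_get h (pvB_runEnd h (PySem.List.len h - 1 - k).toNat k) < pvB_get h k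
    · rw [if_pos h2]
      have hge := fl_ge h (pvB_runEnd h (PySem.List.len h - 1 - k).toNat k - k).toNat
        (pvB_runEnd h (PySem.List.len h - 1 - k).toNat k)
      have hle := fl_le h (pvB_runEnd h (PySem.List.len h - 1 - k).toNat k - k).toNat
        (pvB_runEnd h (PySem.List.len h - 1 - k).toNat k)
      omega
    · rw [if_neg h2]
      omega

-- STABILITY: while the landing cell's level stays below B's bound, it remains the landing cell
theorem stab (h : List Int) (k : Int) (hk0 : 0 ≤ k) (hkn : k < PySem.List.len h)
    (b v : Int) (hb : pvB_bound h (pvB_dropIndex h k) = some b) (hv : v < b) :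
    pvB_dropIndex (PySem.List.pySetD h (pvB_dropIndex h k) v) k = pvB_dropIndex h k := by
  obtain ⟨ht0, htn⟩ := dropIndex_range h k hk0 hkn
  set t := pvB_dropIndex h k with htdef
  set h' := PySem.List.pySetD h t v with hh'
  have hlen' : PySem.List.len h' = PySem.List.len h := len_set h t v
  have hgt : pvA_get h' t = v := by
    rw [hh', get_set h t t v ht0 htn ht0 htn, if_pos rfl]
  have hgo : ∀ i : Int, 0 ≤ i → i < PySem.List.len h → i ≠ t → pvA_get h' i = pvA_get h i := by
    intro i hi0 hin hne
    rw [hh', get_set h t i v ht0 htn hi0 hin, if_neg hne]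
  -- facts about the left run of h
  have hs_le : pvB_runStart h k.toNat k ≤ k := rs_le h k.toNat k
  have hs_ge : (0:Int) ≤ pvB_runStart h k.toNat k := by have := rs_ge h k.toNat k; omega
  by_cases hL : pvB_get h (pvB_runStart h k.toNat k) < pvB_get h k
  · -- LEFT branch: t lies strictly left of k
    set s₀ := pvB_runStart h k.toNat k with hs₀
    have ht_eq : t = pvB_flatRight h (k - s₀).toNat s₀ := by
      rw [htdef]; unfold pvB_dropIndex; rw [if_pos hL]
    have ht_ge : s₀ ≤ t := by rw [ht_eq]; exact fr_ge h _ _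
    have ht_le : t ≤ k := by
      have := fr_le h (k - s₀).toNat s₀; rw [ht_eq]; omega
    have ht_val : pvA_get h t = pvA_get h s₀ := by rw [ht_eq]; exact fr_val h _ _
    have ht_lt_k : t < k := by
      rcases eq_or_lt_of_le ht_le with heq | hlt
      · exfalso; rw [pvB_get_eq, pvB_get_eq] at hL; rw [heq] at ht_val; omega
      · exact hlt
    have hhi : b ≤ pvA_get h (t + 1) := bound_some_hi h t b hb (by omega)
    have hchain : ∀ i : Int, s₀ < i → i ≤ k → pvA_get h (i - 1) ≤ pvA_get h i :=
      rs_chain h k.toNat k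
    -- the new left run stops exactly at t
    have hrs' : pvB_runStart h' k.toNat k = t := by
      apply rs_exact h' k.toNat k t ht_le (by omega)
      · intro i hi1 hi2
        by_cases hit : i - 1 = t
        · have e1 : pvA_get h' (i - 1) = v := by rw [hit]; exact hgt
          have e2 : pvA_get h' i = pvA_get h i := hgo i (by omega) (by omega) (by omega)
          have e3 : pvA_get h i = pvA_get h (t + 1) := by rw [show i = t + 1 by omega]
          rw [e1, e2, e3]
          omega
        · have e1 : pvA_get h' (i - 1) = pvA_get h (i - 1) := hgo (i - 1) (by omega) (by omega) hit
          have e2 : pvA_get h' i = pvA_get h i := hgo i (by omega) (by omega) (by omega)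
          rw [e1, e2]
          exact hchain i (by omega) hi2
      · by_cases ht0' : 0 < t
        · right
          have hlo : b ≤ pvA_get h (t - 1) := bound_some_lo h t b hb ht0'
          have e1 : pvA_get h' (t - 1) = pvA_get h (t - 1) := hgo (t - 1) (by omega) (by omega) (by omega)
          rw [e1, hgt]
          omega
        · left; omega
    -- the branch test still chooses the left side
    have hvk : v < pvA_get h k := by
      have : pvA_get h (t + 1) ≤ pvA_get h k := by
        have := chain_asc (pvA_get h) (k - (t + 1)).toNat (t + 1)
          (fun i hi1 hi2 => hchain i (by omega) (by omega))
        have hcast : t + 1 + ((k - (t + 1)).toNat : Int) = k := by omega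
        rw [hcast] at this
        exact this
      omega
    show pvB_dropIndex h' k = t
    unfold pvB_dropIndex
    rw [hrs']
    rw [if_pos (by rw [pvB_get_eq, pvB_get_eq, hgt, hgo k (by omega) (by omega) (by omega)]; exact hvk)]
    apply fr_now
    rw [hgt, hgo (t + 1) (by omega) (by omega) (by omega)]
    omega
  · -- RIGHT or CENTER branch
    set s₀ := pvB_runStart h k.toNat k with hs₀
    set e₀ := pvB_runEnd h (PySem.List.len h - 1 - k).toNat k with he₀
    have he_ge : k ≤ e₀ := re_ge h _ _
    have he_le : e₀ ≤ PySem.List.len h - 1 := by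
      have := re_le h (PySem.List.len h - 1 - k).toNat k; omega
    have hchainR : ∀ i : Int, k ≤ i → i < e₀ → pvA_get h (i + 1) ≤ pvA_get h i :=
      re_chain h (PySem.List.len h - 1 - k).toNat k
    by_cases hR : pvB_get h e₀ < pvB_get h k
    · -- RIGHT branch: t lies strictly right of k
      have ht_eq : t = pvB_flatLeft h (e₀ - k).toNat e₀ := by
        rw [htdef]; unfold pvB_dropIndex; rw [if_neg hL, if_pos hR]
      have ht_le : t ≤ e₀ := by rw [ht_eq]; exact fl_le h _ _
      have ht_ge : k ≤ t := by
        have := fl_ge h (e₀ - k).toNat e₀; rw [ht_eq]; omega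
      have ht_val : pvA_get h t = pvA_get h e₀ := by rw [ht_eq]; exact fl_val h _ _
      have ht_gt_k : k < t := by
        rcases eq_or_lt_of_le ht_ge with heq | hlt
        · exfalso; rw [pvB_get_eq, pvB_get_eq] at hR; rw [← heq] at ht_val; omega
        · exact hlt
      have hlo : b ≤ pvA_get h (t - 1) := bound_some_lo h t b hb (by omega)
      -- the left run of h' is that of h, and it still fails its test
      have hrs' : pvB_runStart h' k.toNat k = s₀ := by
        rw [hs₀]
        apply rs_congr h h' k.toNat k
        intro i hi1 hi2
        exact hgo i (by omega) (by omega) (by omega)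
      have hsk : ¬ pvB_get h' s₀ < pvB_get h' k := by
        rw [pvB_get_eq, pvB_get_eq, hgo s₀ (by omega) (by omega) (by omega),
            hgo k (by omega) (by omega) (by omega)]
        exact hL
      -- the new right run stops exactly at t
      have hre' : pvB_runEnd h' (PySem.List.len h' - 1 - k).toNat k = t := by
        rw [hlen']
        apply re_exact h' (PySem.List.len h - 1 - k).toNat k t ht_ge (by omega)
        · intro i hi1 hi2
          by_cases hit : i + 1 = t
          · have e1 : pvA_get h' (i + 1) = v := by rw [hit]; exact hgt
            have e2 : pvA_get h' i = pvA_get h i := hgo i (by omega) (by omega) (by omega)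
            have : pvA_get h i = pvA_get h (t - 1) := by rw [show i = t - 1 by omega]
            rw [e1, e2, this]
            omega
          · have e1 : pvA_get h' (i + 1) = pvA_get h (i + 1) := hgo (i + 1) (by omega) (by omega) (by omega)
            have e2 : pvA_get h' i = pvA_get h i := hgo i (by omega) (by omega) (by omega)
            rw [e1, e2]
            exact hchainR i hi1 (by omega)
        · by_cases htn1 : t + 1 < PySem.List.len h
          · right
            have hhi := bound_some_hi h t b hb htn1
            rw [hgt, hgo (t + 1) (by omega) (by omega) (by omega)]
            omega
          · left; omega
      -- the branch test chooses the right side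
      have hvk : v < pvA_get h k := by
        have : pvA_get h (t - 1) ≤ pvA_get h k := by
          have hcd := chain_desc (pvA_get h) ((t - 1) - k).toNat k
            (fun i hi1 hi2 => hchainR i hi1 (by omega))
          have hcast : k + (((t - 1) - k).toNat : Int) = t - 1 := by omega
          rw [hcast] at hcd
          exact hcd
        omega
      show pvB_dropIndex h' k = t
      unfold pvB_dropIndex
      rw [hrs', if_neg hsk, hre']
      rw [if_pos (by rw [pvB_get_eq, pvB_get_eq, hgt, hgo k (by omega) (by omega) (by omega)]; exact hvk)]
      apply fl_now
      rw [hgt, hgo (t - 1) (by omega) (by omega) (by omega)]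
      omega
    · -- CENTER: t = k
      have ht_eq : t = k := by
        rw [htdef]; unfold pvB_dropIndex; rw [if_neg hL, if_neg hR]
      have hgtk : pvA_get h' k = v := by rw [← ht_eq]; exact hgt
      have hrs' : pvB_runStart h' k.toNat k = k := by
        apply rs_exact h' k.toNat k k le_rfl (by omega)
        · intro i hi1 hi2; omega
        · by_cases hk0' : 0 < k
          · right
            have hlo := bound_some_lo h t b hb (by omega)
            rw [ht_eq] at hlo
            rw [hgtk, hgo (k - 1) (by omega) (by omega) (by omega)]
            omega
          · left; omega
      have hre' : pvB_runEnd h' (PySem.List.len h' - 1 - k).toNat k = k := by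
        rw [hlen']
        apply re_exact h' (PySem.List.len h - 1 - k).toNat k k le_rfl (by omega)
        · intro i hi1 hi2; omega
        · by_cases hkn1 : k + 1 < PySem.List.len h
          · right
            have hhi := bound_some_hi h t b hb (by rw [ht_eq]; exact hkn1)
            rw [ht_eq] at hhi
            rw [hgtk, hgo (k + 1) (by omega) (by omega) (by omega)]
            omega
          · left; omega
      show pvB_dropIndex h' k = t
      rw [ht_eq]
      unfold pvB_dropIndex
      rw [hrs', if_neg (lt_irrefl _), hre', if_neg (lt_irrefl _)]

-- a single-cell array: every unit lands on cell 0
theorem dropIndex_single (h : List Int) (hlen : PySem.List.len h = 1) :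
    pvB_dropIndex h 0 = 0 := by
  have hl : h.length = 1 := by
    simp only [PySem.List.len_eq] at hlen
    exact_mod_cast hlen
  simp [pvB_dropIndex, hl, pvB_runStart, pvB_runEnd]

-- iterating A's unit drop j times pours j units on the (stable) landing cell
theorem iter_set (h : List Int) (k : Int) (hk0 : 0 ≤ k) (hkn : k < PySem.List.len h)
    (b : Int) (hb : pvB_bound h (pvB_dropIndex h k) = some b) :
    ∀ j : Nat, 1 ≤ j →
      (∀ i : Nat, 1 ≤ i → i < j → pvA_get h (pvB_dropIndex h k) + i < b) →
      iterDrop k j h = PySem.List.pySetD h (pvB_dropIndex h k) (pvA_get h (pvB_dropIndex h k) + j) := by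
  obtain ⟨ht0, htn⟩ := dropIndex_range h k hk0 hkn
  intro j
  induction j with
  | zero => intro hj; omega
  | succ j ih =>
      intro _ hcond
      by_cases hj : j = 0
      · subst hj
        have h1 : iterDrop k 1 h = pvA_drop h k := by
          simp [iterDrop, List.range_succ]
        rw [h1, drop_eq h k, pvB_get_eq]
        norm_num
      · have hj1 : 1 ≤ j := by omega
        have hstep : iterDrop k (j + 1) h = pvA_drop (iterDrop k j h) k := by
          rw [iterDrop_add k j 1]
          simp [iterDrop, List.range_succ]
        rw [hstep, ih hj1 (fun i hi1 hi2 => hcond i hi1 (by omega))]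
        have hst := stab h k hk0 hkn b (pvA_get h (pvB_dropIndex h k) + j) hb
          (hcond j hj1 (by omega))
        rw [drop_eq _ k, hst]
        have hget : pvB_get (PySem.List.pySetD h (pvB_dropIndex h k) (pvA_get h (pvB_dropIndex h k) + j)) (pvB_dropIndex h k) = pvA_get h (pvB_dropIndex h k) + j := by
          rw [pvB_get_eq, get_set h _ _ _ ht0 htn ht0 htn, if_pos rfl]
        rw [hget, set_set h _ _ _ ht0]
        congr 1
        push_cast
        ring

theorem iter_set_single (h : List Int) (hlen : PySem.List.len h = 1) :
    ∀ j : Nat, 1 ≤ j →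
      iterDrop 0 j h = PySem.List.pySetD h 0 (pvA_get h 0 + j) := by
  have h0n : (0:Int) < PySem.List.len h := by omega
  intro j
  induction j with
  | zero => intro hj; omega
  | succ j ih =>
      intro _
      by_cases hj : j = 0
      · subst hj
        have h1 : iterDrop 0 1 h = pvA_drop h 0 := by
          simp [iterDrop, List.range_succ]
        rw [h1, drop_eq h 0, dropIndex_single h hlen, pvB_get_eq]
        norm_num
      · have hj1 : 1 ≤ j := by omega
        have hstep : iterDrop 0 (j + 1) h = pvA_drop (iterDrop 0 j h) 0 := by
          rw [iterDrop_add 0 j 1]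
          simp [iterDrop, List.range_succ]
        rw [hstep, ih hj1]
        have hlen2 : PySem.List.len (PySem.List.pySetD h 0 (pvA_get h 0 + j)) = 1 := by
          rw [len_set]; exact hlen
        rw [drop_eq _ 0, dropIndex_single _ hlen2]
        have hget : pvB_get (PySem.List.pySetD h 0 (pvA_get h 0 + j)) 0 = pvA_get h 0 + j := by
          rw [pvB_get_eq, get_set h 0 0 _ le_rfl h0n le_rfl h0n, if_pos rfl]
        rw [hget, set_set h 0 _ _ le_rfl]
        congr 1
        push_cast
        ring

-- main loop correspondence
theorem loop_eq (k : Int) (hk0 : 0 ≤ k) :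
    ∀ rem : Int, ∀ h : List Int, k < PySem.List.len h →
      iterDrop k rem.toNat h = pvB_loop k h rem := by
  suffices H : ∀ m : Nat, ∀ rem : Int, rem.toNat = m → ∀ h : List Int,
      k < PySem.List.len h → iterDrop k rem.toNat h = pvB_loop k h rem by
    intro rem h hkn
    exact H rem.toNat rem rfl h hkn
  intro m
  induction m using Nat.strong_induction_on with
  | _ m ih =>
    intro rem hm h hkn
    rw [pvB_loop]
    by_cases hpos : 0 < rem
    · rw [if_pos hpos]
      rcases hbb : pvB_bound h (pvB_dropIndex h k) with _ | b
      · -- single-cell array: pour everything at once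
        obtain ⟨hb1, hb2⟩ := bound_none h _ hbb
        obtain ⟨ht0, htn⟩ := dropIndex_range h k hk0 hkn
        have hk0' : k = 0 := by omega
        have hlen1 : PySem.List.len h = 1 := by omega
        have ht_eq : pvB_dropIndex h k = 0 := by rw [hk0']; exact dropIndex_single h hlen1
        simp only [hbb]
        rw [sub_self, pvB_loop]
        norm_num
        rw [ht_eq, hk0', pvB_get_eq]
        have := iter_set_single h hlen1 rem.toNat (by omega)
        rw [this]
        congr 1
        omega
      · simp only [hbb]
        have hc1 : (1:Int) ≤ max 1 (min rem (b - pvB_get h (pvB_dropIndex h k))) := le_max_left _ _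
        have hcr : max 1 (min rem (b - pvB_get h (pvB_dropIndex h k))) ≤ rem := by
          rcases le_total 1 (min rem (b - pvB_get h (pvB_dropIndex h k))) with hx | hx
          · rw [max_eq_right hx]; exact min_le_left _ _
          · rw [max_eq_left hx]; omega
        set c := max 1 (min rem (b - pvB_get h (pvB_dropIndex h k))) with hc
        have hcmin : c ≤ b - pvB_get h (pvB_dropIndex h k) ∨ c = 1 := by
          rw [hc]
          rcases le_total 1 (min rem (b - pvB_get h (pvB_dropIndex h k))) with hx | hx
          · left; rw [max_eq_right hx]; exact min_le_right _ _
          · right; rw [max_eq_left hx]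
        have hcond : ∀ i : Nat, 1 ≤ i → i < c.toNat → pvA_get h (pvB_dropIndex h k) + i < b := by
          intro i hi1 hi2
          rw [← pvB_get_eq]
          rcases hcmin with hx | hx
          · omega
          · omega
        have hsplit : rem.toNat = c.toNat + (rem - c).toNat := by omega
        rw [hsplit, iterDrop_add]
        rw [iter_set h k hk0 hkn b hbb c.toNat (by omega) hcond]
        have hcast : (c.toNat : Int) = c := by omega
        rw [hcast]
        have hlen2 : k < PySem.List.len (PySem.List.pySetD h (pvB_dropIndex h k) (pvA_get h (pvB_dropIndex h k) + c)) := by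
          rw [len_set]; exact hkn
        exact ih (rem - c).toNat (by omega) (rem - c) rfl _ hlen2
    · rw [if_neg hpos]
      have h0 : rem.toNat = 0 := by omega
      rw [h0]
      rfl

-- ===== VERDICT (by name: the statement is the Claim_ definition above) =====
theorem pourWater_spec : Claim_equal_pourWater := by
  intro heights volume k _ hpre
  unfold Spec_pourWater
  show pourWater heights volume k = pourWater_alt heights volume k
  rcases hpre with hvol | ⟨hk0, hkn⟩
  · have h0 : volume.toNat = 0 := by omega
    unfold pourWater pourWater_alt
    rw [h0, pvB_loop]
    simp [show ¬ (0 < volume) by omega]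
  · exact loop_eq k hk0 volume heights hkn
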